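-- pv_equiv track=rewrite | github.com/itsfimes/atf-autotype | modules/corrector.py | correct_sro
-- ===== SOURCE A (Python) =====
-- def correct_sro(text: str) -> str:
--     result = []
--     i = 0
--
--     while i < len(text):
--         if text[i:i+5] == "s. r.":
--             result.append("s. r.")
--             i += 5
--             result.append(" o.")
--             i += 3
--         else:
--             result.append(text[i])
--             i += 1
--
--     return "".join(result)
-- ===== SOURCE B (Python) =====
-- def correct_sro(text: str) -> str:
--     parts = []
--     while True:
--         pos = text.find("s. r.")
--         if pos == -1:
--             parts.append(text)
--             break
--         parts.append(text[:pos + 5] + " o.")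
--         text = text[pos + 8:]
--     return "".join(parts)
-- ===== Notes on version B (the rewrite author's own statement) =====
-- stated objective: faster
-- what changed: B jumps between occurrences with str.find and slicing (append text[:pos+5] + ' o.', continue from pos+8) instead of A's per-character scan with a 5-char window comparison at every index.
import Mathlib
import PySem

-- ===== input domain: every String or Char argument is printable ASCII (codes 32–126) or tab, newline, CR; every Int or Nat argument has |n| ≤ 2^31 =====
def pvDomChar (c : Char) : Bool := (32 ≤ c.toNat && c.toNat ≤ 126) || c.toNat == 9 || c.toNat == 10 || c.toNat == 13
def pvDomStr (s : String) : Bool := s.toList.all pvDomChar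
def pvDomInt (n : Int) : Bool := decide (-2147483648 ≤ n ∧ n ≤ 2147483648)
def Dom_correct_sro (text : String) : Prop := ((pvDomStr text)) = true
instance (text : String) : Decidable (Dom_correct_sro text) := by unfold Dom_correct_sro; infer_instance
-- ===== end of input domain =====

-- B replaces A's per-character scan (window test at every index) by a find-and-jump loop over
-- occurrences of "s. r.", using slicing to reproduce A's skip of the 3 characters after a match.

-- the pattern "s. r." as a char list
def pvSub : List Char := ['s', '.', ' ', 'r', '.']

-- ===== PORT A =====
-- A: scan char by char; on a 5-char window match append "s. r." and " o." and skip 8, else copy one char.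
def pvLoopA : List Char → List Char
  | [] => []
  | c :: rest =>
    if (c :: rest).take 5 = pvSub then
      pvSub ++ [' ', 'o', '.'] ++ pvLoopA ((c :: rest).drop 8)
    else
      c :: pvLoopA rest
  termination_by cs => cs.length
  decreasing_by all_goals simp

def correct_sro (text : String) : String := String.ofList (pvLoopA text.toList)

-- ===== PORT B =====
-- B: find the next occurrence; append text[:pos+5] + " o." and continue from text[pos+8:].
def pvLoopB (cs : List Char) : List Char :=
  if hfound : PySem.Chars.find cs pvSub = -1 then cs
  else cs.take ((PySem.Chars.find cs pvSub).toNat + 5) ++ [' ', 'o', '.'] ++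
       pvLoopB (cs.drop ((PySem.Chars.find cs pvSub).toNat + 8))
  termination_by cs.length
  decreasing_by
    have hinf : pvSub <:+: cs := (PySem.Chars.find_ne_neg_one_iff cs pvSub).mp hfound
    have h5 : 5 ≤ cs.length := hinf.length_le
    simp; omega

def correct_sro_alt (text : String) : String := String.ofList (pvLoopB text.toList)

-- ===== PRECONDITION & SPEC =====
def Spec_correct_sro (text : String) (out : String) : Prop := out = correct_sro_alt text
instance (text : String) (out : String) : Decidable (Spec_correct_sro text out) := by unfold Spec_correct_sro; infer_instance

-- ===== CLAIM (what is proved, stated in full; the proofs are below) =====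
def Claim_equal_correct_sro : Prop := ∀ (text : String), Dom_correct_sro text → Spec_correct_sro text (correct_sro text)

-- ===== LEMMAS AND PROOFS =====

-- unfolding lemma for pvLoopA on a nonempty list
theorem pvLoopA_cons (c : Char) (rest : List Char) :
    pvLoopA (c :: rest) =
      if (c :: rest).take 5 = pvSub then
        pvSub ++ [' ', 'o', '.'] ++ pvLoopA ((c :: rest).drop 8)
      else c :: pvLoopA rest := by
  rw [pvLoopA.eq_def]

-- if the pattern occurs nowhere, A copies every character
theorem pvLoopA_no_match (cs : List Char) (h : ∀ j, ¬ pvSub <+: cs.drop j) :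
    pvLoopA cs = cs := by
  induction cs with
  | nil => simp [pvLoopA]
  | cons c rest ih =>
    have h0 : ¬ (c :: rest).take 5 = pvSub := by
      intro he
      exact h 0 (by simpa using (List.prefix_iff_eq_take.mpr he.symm))
    rw [pvLoopA_cons, if_neg h0, ih (fun j => by simpa using h (j + 1))]

-- if the FIRST occurrence is at k, A copies k chars, emits "s. r. o." and continues at k+8
theorem pvLoopA_first_match :
    ∀ (k : Nat) (cs : List Char), (∀ i < k, ¬ pvSub <+: cs.drop i) → pvSub <+: cs.drop k →
      pvLoopA cs = cs.take k ++ pvSub ++ [' ', 'o', '.'] ++ pvLoopA (cs.drop (k + 8)) := by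
  intro k
  induction k with
  | zero =>
    intro cs _ hk
    simp only [List.drop_zero] at hk
    obtain ⟨c, rest, rfl⟩ : ∃ c rest, cs = c :: rest := by
      cases cs with
      | nil => exact absurd (List.prefix_nil.mp hk) (by simp [pvSub])
      | cons c rest => exact ⟨c, rest, rfl⟩
    have ht : (c :: rest).take 5 = pvSub := ((List.prefix_iff_eq_take.mp hk).symm)
    rw [pvLoopA_cons, if_pos ht]
    simp

  | succ k ih =>
    intro cs hmin hk
    obtain ⟨c, rest, rfl⟩ : ∃ c rest, cs = c :: rest := by
      cases cs with
      | nil => exact absurd (List.prefix_nil.mp (by simpa using hk)) (by simp [pvSub])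
      | cons c rest => exact ⟨c, rest, rfl⟩
    have h0 : ¬ (c :: rest).take 5 = pvSub := by
      intro he
      exact hmin 0 (Nat.succ_pos k) (by simpa using (List.prefix_iff_eq_take.mpr he.symm))
    rw [pvLoopA_cons, if_neg h0,
        ih rest (fun i hi => by simpa using hmin (i + 1) (by omega)) (by simpa using hk)]
    simp [List.take_succ_cons, List.drop_succ_cons]

-- the two loops agree on every char list (strong induction on the length)
theorem pvLoop_eq_aux (n : Nat) : ∀ cs : List Char, cs.length ≤ n → pvLoopA cs = pvLoopB cs := by
  induction n using Nat.strong_induction_on with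
  | _ n ih =>
    intro cs hlen
    by_cases h : PySem.Chars.find cs pvSub = -1
    · rw [pvLoopB, dif_pos h]
      apply pvLoopA_no_match
      intro j hpre
      have hinf : pvSub <:+: cs :=
        List.infix_iff_prefix_suffix.mpr ⟨_, hpre, List.drop_suffix j cs⟩
      exact ((PySem.Chars.find_ne_neg_one_iff cs pvSub).mpr hinf) h
    · have hfind : 0 ≤ PySem.Chars.find cs pvSub := by
        have := PySem.Chars.neg_one_le_find cs pvSub
        omega
      obtain ⟨hpre, hmin⟩ := PySem.Chars.find_spec (s := cs) (sub := pvSub) hfind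
      have h5 : 5 ≤ cs.length :=
        ((PySem.Chars.find_ne_neg_one_iff cs pvSub).mp h).length_le
      have hpos : 0 < cs.length := by omega
      rw [pvLoopB, dif_neg h]
      set k := (PySem.Chars.find cs pvSub).toNat with hkdef
      have htake : cs.take (k + 5) = cs.take k ++ pvSub := by
        have h2 : List.take 5 (List.drop k cs) = pvSub :=
          (List.prefix_iff_eq_take.mp hpre).symm
        rw [List.take_add, h2]
      have hrec : pvLoopA (cs.drop (k + 8)) = pvLoopB (cs.drop (k + 8)) := by
        apply ih (cs.drop (k + 8)).length (by simp; omega) _ le_rfl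
      rw [pvLoopA_first_match k cs hmin hpre, htake, hrec]

theorem pvLoop_eq (cs : List Char) : pvLoopA cs = pvLoopB cs :=
  pvLoop_eq_aux cs.length cs le_rfl

-- ===== VERDICT (by name: the statement is the Claim_ definition above) =====
theorem correct_sro_spec : Claim_equal_correct_sro := by
  intro text _
  unfold Spec_correct_sro correct_sro correct_sro_alt
  rw [pvLoop_eq]
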